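-- pv_equiv track=rewrite | github.com/egitto/parchment-and-copper | scratch/cryptopals/bytestring_tools.py | b64_to_long
-- ===== SOURCE A (Python) =====
-- def b64_to_long(b64):
--   key = 'ABCDEFGHIJKLMNOPQRSTUVWXYZabcdefghijklmnopqrstuvwxyz0123456789+/'
--   # a = [key.index(x) for x in b64]
--   key = {item: i for i,item in enumerate(key)}
--   key['=']=0
--   a = [key[x] for x in b64]
--   acc = 0
--   for x in a:
--     acc = acc << 6
--     acc += x
--   return acc
-- ===== SOURCE B (Python) =====
-- def b64_to_long(b64):
--   acc = 0
--   shift = 0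
--   for c in reversed(b64):
--     o = ord(c)
--     if 65 <= o <= 90:
--       v = o - 65
--     elif 97 <= o <= 122:
--       v = o - 71
--     elif 48 <= o <= 57:
--       v = o + 4
--     elif c == '+':
--       v = 62
--     elif c == '/':
--       v = 63
--     elif c == '=':
--       v = 0
--     else:
--       raise KeyError(c)
--     acc += v << shift
--     shift += 6
--   return acc
-- ===== Notes on version B (the rewrite author's own statement) =====
-- stated objective: alternative
-- what changed: Dropped the dict and the intermediate value list entirely: B walks the string back-to-front in one pass, classifies each character arithmetically by its code point (range tests instead of a lookup table) and accumulates acc += v << shift with a running shift, instead of A's dict build + list comprehension + left-to-right Horner loop.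
import Mathlib
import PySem

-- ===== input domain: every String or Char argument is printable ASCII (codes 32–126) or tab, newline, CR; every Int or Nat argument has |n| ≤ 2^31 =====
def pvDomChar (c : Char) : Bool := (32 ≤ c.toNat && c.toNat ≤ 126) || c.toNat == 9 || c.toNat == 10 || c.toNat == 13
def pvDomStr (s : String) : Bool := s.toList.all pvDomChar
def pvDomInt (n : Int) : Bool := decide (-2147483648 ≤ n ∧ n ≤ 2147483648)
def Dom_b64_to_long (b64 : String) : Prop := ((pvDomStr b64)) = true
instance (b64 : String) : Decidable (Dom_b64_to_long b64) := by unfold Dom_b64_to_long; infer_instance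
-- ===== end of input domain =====

-- B drops A's dict and intermediate value list: one back-to-front pass, classifying each
-- char arithmetically by code point and adding v << shift (alternative decomposition, same cost).

def b64_keyStr : String := "ABCDEFGHIJKLMNOPQRSTUVWXYZabcdefghijklmnopqrstuvwxyz0123456789+/"

-- ===== PORT A =====
def b64_to_long (b64 : String) : Int :=
  let key := PySem.Dict.ofList ((PySem.List.enumerate b64_keyStr.toList 0).map (fun p => (p.2, p.1)))
  let key := key.insert '=' 0
  -- Python raises KeyError on a char not in the dict; Pre_ excludes those inputs (getD 0 here)
  let a := b64.toList.map (fun x => (key.get? x).getD 0)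
  a.foldl (fun (acc x : Int) => (acc <<< (6 : Nat)) + x) 0

-- ===== PORT B =====
-- per-char value by code-point range tests (Source B's if/elif chain); Python raises KeyError on
-- the final else branch, those inputs are excluded by Pre_ (0 here)
def b64_val (c : Char) : Int :=
  let o : Int := c.toNat
  if 65 ≤ o ∧ o ≤ 90 then o - 65
  else if 97 ≤ o ∧ o ≤ 122 then o - 71
  else if 48 ≤ o ∧ o ≤ 57 then o + 4
  else if c = '+' then 62
  else if c = '/' then 63
  else 0

def b64_to_long_alt (b64 : String) : Int :=
  (b64.toList.reverse.foldl
    (fun (p : Int × Nat) c => (p.1 + (b64_val c <<< p.2), p.2 + 6)) ((0 : Int), (0 : Nat))).1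

-- ===== PRECONDITION & SPEC =====
-- Pre_ excludes exactly the strings containing a char outside the base64 alphabet ∪ {'='},
-- on which Python A raises KeyError (and B raises KeyError too).
def Pre_b64_to_long (b64 : String) : Prop :=
  (b64.toList.all (fun c => (b64_keyStr.toList.contains c) || c == '=')) = true
instance (b64 : String) : Decidable (Pre_b64_to_long b64) := by unfold Pre_b64_to_long; infer_instance
def pvWitness_b64_to_long : String := "TWFu="

def Spec_b64_to_long (b64 : String) (out : Int) : Prop := out = b64_to_long_alt b64
instance (b64 : String) (out : Int) : Decidable (Spec_b64_to_long b64 out) := by unfold Spec_b64_to_long; infer_instance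

-- ===== CLAIM (what is proved, stated in full; the proofs are below) =====
def Claim_equal_b64_to_long : Prop := ∀ (b64 : String), Dom_b64_to_long b64 → Pre_b64_to_long b64 → Spec_b64_to_long b64 (b64_to_long b64)

-- ===== LEMMAS AND PROOFS =====

-- A's per-char dict lookup, as a named function (definitionally what port A maps over the string)
def pvDictVal (c : Char) : Int :=
  ((((PySem.Dict.ofList ((PySem.List.enumerate b64_keyStr.toList 0).map (fun p => (p.2, p.1)))).insert '=' 0)).get? c).getD 0

-- digit list read least-significant-first
def pvHR : List Char → Int
  | [] => 0
  | c :: m => b64_val c + 64 * pvHR m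

set_option maxRecDepth 10000 in
lemma pvVal_agree (c : Char) (hc : (b64_keyStr.toList.contains c || c == '=') = true) :
    pvDictVal c = b64_val c := by
  have hall : ((b64_keyStr.toList ++ ['=']).all (fun c => pvDictVal c == b64_val c)) = true := by
    decide
  rw [Bool.or_eq_true] at hc
  rcases hc with h | h
  · have hm : c ∈ b64_keyStr.toList ++ ['='] :=
      List.mem_append_left _ (List.contains_iff_mem.mp h)
    exact eq_of_beq (List.all_eq_true.mp hall c hm)
  · have : c = '=' := eq_of_beq h
    subst this
    exact eq_of_beq (List.all_eq_true.mp hall '=' (by simp))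

lemma pvB_fold (m : List Char) (acc : Int) (sh : Nat) :
    (m.foldl (fun (p : Int × Nat) c => (p.1 + (b64_val c <<< p.2), p.2 + 6)) (acc, sh)).1
      = acc + 2 ^ sh * pvHR m := by
  induction m generalizing acc sh with
  | nil => simp [pvHR]
  | cons c m ih =>
      rw [List.foldl_cons, ih]
      rw [Int.shiftLeft_eq, pvHR]
      rw [pow_add]
      push_cast
      ring

lemma pvHorner_eq (l : List Char) :
    l.foldl (fun (acc : Int) (c : Char) => (acc <<< (6 : Nat)) + b64_val c) 0 = pvHR l.reverse := by
  induction l using List.reverseRecOn with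
  | nil => simp [pvHR]
  | append_singleton xs x ih =>
      rw [List.foldl_append, List.reverse_append]
      simp only [List.foldl_cons, List.foldl_nil, List.reverse_singleton, List.singleton_append]
      rw [pvHR, ih, Int.shiftLeft_eq]
      norm_num
      ring

-- ===== VERDICT (by name: the statement is the Claim_ definition above) =====
theorem b64_to_long_spec : Claim_equal_b64_to_long := by
  intro b64 _ hpre
  unfold Spec_b64_to_long
  show (b64.toList.map pvDictVal).foldl (fun (acc x : Int) => (acc <<< (6 : Nat)) + x) 0
      = (b64.toList.reverse.foldl
          (fun (p : Int × Nat) c => (p.1 + (b64_val c <<< p.2), p.2 + 6)) ((0 : Int), (0 : Nat))).1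
  have hmap : b64.toList.map pvDictVal = b64.toList.map b64_val :=
    List.map_congr_left (fun c hc => pvVal_agree c (List.all_eq_true.mp hpre c hc))
  rw [hmap, List.foldl_map, pvB_fold, pvHorner_eq]
  simp
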